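-- pv_equiv track=rewrite | github.com/aaron-mcbride/tal_svd_parser | svd_parser3.py | fmt_desc
-- ===== SOURCE A (Python) =====
-- def fmt_desc(desc: str) -> str:
--     new_desc = ""
--     is_first = True
--     for word in desc.split():
--         if is_first:
--             new_desc += word[0].upper() + word[1:]
--         elif not word.isupper():
--             new_desc += word.lower()
--         else:
--             new_desc += word
--         new_desc += " "
--         is_first = word[-1] == "."
--     new_desc = new_desc.replace("\n", " ")
--     return new_desc.strip()
-- ===== SOURCE B (Python) =====
-- def fmt_desc(desc: str) -> str:
--     # Group the words into sentences (a sentence ends at a word ending in '.'),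
--     # then format each sentence independently and join once.
--     sentences = []
--     cur = []
--     for w in desc.split():
--         cur.append(w)
--         if w.endswith("."):
--             sentences.append(cur)
--             cur = []
--     if cur:
--         sentences.append(cur)
--     out = []
--     for sent in sentences:
--         first = sent[0]
--         out.append(first[0].upper() + first[1:])
--         for w in sent[1:]:
--             out.append(w if w.isupper() else w.lower())
--     return " ".join(out)
-- ===== Notes on version B (the rewrite author's own statement) =====
-- stated objective: alternative
-- what changed: B first groups the split words into sentence lists (closing a group at each word ending in a period), then formats each sentence independently (capitalize its first word, lowercase non-all-uppercase followers) and joins all formatted words once with a single-space separator, instead of A's single pass threading an is_first flag with append-space-then-strip and a redundant newline replace.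
import Mathlib
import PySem

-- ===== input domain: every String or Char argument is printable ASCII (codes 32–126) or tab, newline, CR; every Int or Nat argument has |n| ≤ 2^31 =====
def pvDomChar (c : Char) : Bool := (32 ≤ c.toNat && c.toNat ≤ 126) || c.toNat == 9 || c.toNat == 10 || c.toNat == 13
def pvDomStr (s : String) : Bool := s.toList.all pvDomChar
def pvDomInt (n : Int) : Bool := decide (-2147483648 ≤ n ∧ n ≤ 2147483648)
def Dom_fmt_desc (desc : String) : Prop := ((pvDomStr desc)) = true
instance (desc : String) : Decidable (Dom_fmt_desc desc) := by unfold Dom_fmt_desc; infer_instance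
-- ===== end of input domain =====

-- B regroups the words into sentence lists and formats each sentence independently,
-- instead of A's single pass threading an `is_first` flag; same return value, an
-- alternative decomposition (not claimed faster).

-- ===== PORT A =====
-- hand port of Python str.isupper (exact on the ASCII domain: at least one letter
-- and no lowercase letter), used by both versions
def pyIsupper (w : List Char) : Bool :=
  w.any PySem.Chars.isalpha && w.all (fun c => !PySem.Chars.islower c)

-- word[0].upper() + word[1:]  (words from split() are never empty; [] is a totality guard)
def capFirst (w : List Char) : List Char :=
  match w with
  | [] => []
  | c :: rest => PySem.Chars.upperChar c :: rest

-- one iteration of A's loop body: state = (new_desc, is_first)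
def fmtStepA (st : List Char × Bool) (word : List Char) : List Char × Bool :=
  (st.1 ++ (if st.2 then capFirst word
            else if !pyIsupper word then PySem.Chars.lower word
            else word) ++ [' '],
   PySem.List.pyGet? word (-1) == some '.')

def fmt_desc (desc : String) : String :=
  let st := (PySem.Chars.split₀ desc.toList).foldl fmtStepA ([], true)
  String.mk (PySem.Chars.strip (PySem.Chars.replace st.1 ['\n'] [' ']))

-- ===== PORT B =====
-- first pass: group the words into sentences, closing a group at each word ending in '.'
def groupSentences : List (List Char) → List (List Char) → List (List (List Char))
  | [], cur => if cur.isEmpty then [] else [cur]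
  | w :: ws, cur =>
      let cur' := cur ++ [w]
      if PySem.Chars.endswith w ['.'] then cur' :: groupSentences ws []
      else groupSentences ws cur'

-- second pass: format one sentence on its own
def fmtSentence : List (List Char) → List (List Char)
  | [] => []
  | first :: rest =>
      capFirst first :: rest.map (fun w => if pyIsupper w then w else PySem.Chars.lower w)

def fmt_desc_alt (desc : String) : String :=
  String.mk (PySem.Chars.join [' ']
    (((groupSentences (PySem.Chars.split₀ desc.toList) []).map fmtSentence).flatten))

-- ===== PRECONDITION & SPEC =====
def Spec_fmt_desc (desc : String) (out : String) : Prop := out = fmt_desc_alt desc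
instance (desc : String) (out : String) : Decidable (Spec_fmt_desc desc out) := by unfold Spec_fmt_desc; infer_instance

-- ===== CLAIM (what is proved, stated in full; the proofs are below) =====
def Claim_equal_fmt_desc : Prop := ∀ (desc : String), Dom_fmt_desc desc → Spec_fmt_desc desc (fmt_desc desc)

-- ===== LEMMAS AND PROOFS =====

def fmtW (b : Bool) (w : List Char) : List Char :=
  if b then capFirst w else if !pyIsupper w then PySem.Chars.lower w else w

def endsDot (w : List Char) : Bool := PySem.List.pyGet? w (-1) == some '.'

-- the word-level result of A's scan
def procW : Bool → List (List Char) → List (List Char)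
  | _, [] => []
  | b, w :: ws => fmtW b w :: procW (endsDot w) ws

def flatSp (outs : List (List Char)) : List Char := outs.flatMap (· ++ [' '])

def goodWord (w : List Char) : Prop := w ≠ [] ∧ ∀ c ∈ w, PySem.Chars.isspace c = false

lemma endswith_eq (w : List Char) : PySem.Chars.endswith w ['.'] = endsDot w := by
  rcases w.eq_nil_or_concat with rfl | ⟨t, c, rfl⟩
  · simp [PySem.Chars.endswith, List.isSuffixOf, endsDot, PySem.List.pyGet?, PySem.List.pyIdx?]
  · simp [PySem.Chars.endswith, List.isSuffixOf, List.isPrefixOf, endsDot,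
      PySem.List.pyGet?, PySem.List.pyIdx?]
    exact eq_comm

lemma foldA (ws : List (List Char)) : ∀ (pre : List Char) (b : Bool),
    (ws.foldl fmtStepA (pre, b)).1 = pre ++ flatSp (procW b ws) := by
  induction ws with
  | nil => intro pre b; simp [flatSp, procW]
  | cons w ws ih =>
      intro pre b
      rw [List.foldl_cons]
      show ((ws.foldl fmtStepA (fmtStepA (pre, b) w))).1 = _
      rw [ih]
      simp [fmtStepA, flatSp, procW, fmtW, endsDot, List.flatMap_cons, List.append_assoc]

lemma fmtSentence_concat (cur : List (List Char)) (w : List Char) :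
    fmtSentence (cur ++ [w]) =
      (if cur.isEmpty then [] else fmtSentence cur) ++ [fmtW cur.isEmpty w] := by
  cases cur with
  | nil => simp [fmtSentence, fmtW]
  | cons c cs =>
      show capFirst c :: (cs ++ [w]).map _ = _
      cases h : pyIsupper w <;> simp [fmtSentence, fmtW, h]

lemma group_scan (ws : List (List Char)) : ∀ (cur : List (List Char)),
    ((groupSentences ws cur).map fmtSentence).flatten =
      (if cur.isEmpty then [] else fmtSentence cur) ++ procW cur.isEmpty ws := by
  induction ws with
  | nil =>
      intro cur
      cases cur <;> simp [groupSentences, procW, fmtSentence]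
  | cons w ws ih =>
      intro cur
      unfold groupSentences
      cases hd : PySem.Chars.endswith w ['.'] with
      | true =>
          rw [endswith_eq] at hd
          simp only [endswith_eq, hd, if_true, List.map_cons, List.flatten_cons, ih [],
            procW, fmtSentence_concat]
          simp [List.append_assoc, List.isEmpty_iff]
      | false =>
          rw [endswith_eq] at hd
          simp only [endswith_eq, hd, Bool.false_eq_true, if_false]
          rw [ih (cur ++ [w])]
          rw [fmtSentence_concat]
          have he : (cur ++ [w]).isEmpty = false := by simp
          simp [procW, hd, he, List.append_assoc]

lemma split₀_go_good (s : List Char) : ∀ (cur : List Char) (acc : List (List Char)),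
    (∀ c ∈ cur, PySem.Chars.isspace c = false) →
    (∀ w ∈ acc, goodWord w) →
    ∀ w ∈ PySem.Chars.split₀.go s cur acc, goodWord w := by
  induction s with
  | nil =>
      intro cur acc hcur hacc w hw
      rw [PySem.Chars.split₀.go] at hw
      by_cases h : cur.isEmpty
      · rw [if_pos h] at hw; exact hacc w (List.mem_reverse.mp hw)
      · rw [if_neg h] at hw
        rcases List.mem_cons.mp (List.mem_reverse.mp hw) with rfl | h1
        · refine ⟨?_, fun d hd => hcur d (List.mem_reverse.mp hd)⟩
          simp only [ne_eq, List.reverse_eq_nil_iff]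
          simpa using h
        · exact hacc w h1
  | cons c rest ih =>
      intro cur acc hcur hacc w hw
      rw [PySem.Chars.split₀.go] at hw
      by_cases hs : PySem.Chars.isspace c
      · rw [if_pos hs] at hw
        by_cases he : cur.isEmpty
        · rw [if_pos he] at hw
          exact ih [] acc (by simp) hacc w hw
        · rw [if_neg he] at hw
          refine ih [] _ (by simp) ?_ w hw
          intro u hu
          rcases List.mem_cons.mp hu with rfl | hu
          · exact ⟨by simpa using (List.isEmpty_eq_false_iff).mp (by simpa using he),
              fun d hd => hcur d (List.mem_reverse.mp hd)⟩
          · exact hacc u hu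
      · rw [if_neg hs] at hw
        refine ih (c :: cur) acc ?_ hacc w hw
        intro d hd
        rcases List.mem_cons.mp hd with rfl | hd
        · simpa using hs
        · exact hcur d hd

lemma split₀_good (s : List Char) : ∀ w ∈ PySem.Chars.split₀ s, goodWord w := by
  unfold PySem.Chars.split₀
  exact split₀_go_good s [] [] (by simp) (by simp)

lemma isspace_upperChar {c : Char} (h : PySem.Chars.isspace c = false) :
    PySem.Chars.isspace (PySem.Chars.upperChar c) = false := by
  unfold PySem.Chars.upperChar
  by_cases hl : PySem.Chars.islower c
  · rw [if_pos hl]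
    have hc : 97 ≤ c.toNat ∧ c.toNat ≤ 122 := by
      simpa [PySem.Chars.islower, Char.le_def] using hl
    have hv : (c.toNat - 32).isValidChar := Or.inl (by omega)
    unfold PySem.Chars.isspace
    simp only [Char.ofNat, hv, dif_pos, Char.ofNatAux]
    simp only [Char.toNat]
    simp
    omega
  · rw [if_neg hl]; exact h

lemma isspace_lowerChar {c : Char} (h : PySem.Chars.isspace c = false) :
    PySem.Chars.isspace (PySem.Chars.lowerChar c) = false := by
  unfold PySem.Chars.lowerChar
  by_cases hu : PySem.Chars.isupper c
  · rw [if_pos hu]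
    have hc : 65 ≤ c.toNat ∧ c.toNat ≤ 90 := by
      simpa [PySem.Chars.isupper, Char.le_def] using hu
    have hv : (c.toNat + 32).isValidChar := Or.inl (by omega)
    unfold PySem.Chars.isspace
    simp only [Char.ofNat, hv, dif_pos, Char.ofNatAux]
    simp only [Char.toNat]
    simp
    omega
  · rw [if_neg hu]; exact h

lemma lower_good {w : List Char} (hw : goodWord w) : goodWord (PySem.Chars.lower w) := by
  refine ⟨by simpa [PySem.Chars.lower] using hw.1, ?_⟩
  intro c hc
  rcases List.mem_map.mp (by simpa [PySem.Chars.lower] using hc) with ⟨d, hd, rfl⟩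
  exact isspace_lowerChar (hw.2 d hd)

lemma fmtW_good {w : List Char} (hw : goodWord w) (b : Bool) : goodWord (fmtW b w) := by
  unfold fmtW
  rcases List.exists_cons_of_ne_nil hw.1 with ⟨a, as, rfl⟩
  cases b with
  | true =>
      refine ⟨by simp [capFirst], ?_⟩
      intro c hc
      rcases List.mem_cons.mp (by simpa [capFirst] using hc) with rfl | hc
      · exact isspace_upperChar (hw.2 a (by simp))
      · exact hw.2 c (List.mem_cons_of_mem _ hc)
  | false =>
      by_cases hu : pyIsupper (a :: as)
      · simpa [hu] using hw
      · simpa [hu] using lower_good hw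

lemma procW_good {ws : List (List Char)} (h : ∀ w ∈ ws, goodWord w) (b : Bool) :
    ∀ u ∈ procW b ws, goodWord u := by
  induction ws generalizing b with
  | nil => simp [procW]
  | cons w ws ih =>
      intro u hu
      rcases List.mem_cons.mp (by simpa [procW] using hu) with rfl | hu
      · exact fmtW_good (h w (by simp)) b
      · exact ih (fun v hv => h v (List.mem_cons_of_mem _ hv)) (endsDot w) u hu

lemma replace_go_noop (fuel : Nat) : ∀ (l acc : List Char), '\n' ∉ l →
    PySem.Chars.replace.go ['\n'] [' '] fuel l acc = acc.reverse ++ l := by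
  induction fuel with
  | zero => intro l acc h; rw [PySem.Chars.replace.go]
  | succ n ih =>
      intro l acc h
      cases l with
      | nil => rw [PySem.Chars.replace.go] <;> simp
      | cons c t =>
          rw [PySem.Chars.replace.go]
          have hc : c ≠ '\n' := fun hh => h (hh ▸ List.mem_cons_self)
          have hp : List.isPrefixOf ['\n'] (c :: t) = false := by
            simp [List.isPrefixOf]; exact fun hh => absurd hh.symm hc
          rw [if_neg (by simp [hp])]
          rw [ih t (c :: acc) (fun hh => h (List.mem_cons_of_mem _ hh))]
          simp

lemma replace_noop {l : List Char} (h : '\n' ∉ l) :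
    PySem.Chars.replace l ['\n'] [' '] = l := by
  unfold PySem.Chars.replace
  rw [if_neg (by simp)]
  simpa using replace_go_noop l.length l [] h

lemma no_newline_flatSp {outs : List (List Char)} (h : ∀ u ∈ outs, goodWord u) :
    '\n' ∉ flatSp outs := by
  intro hm
  rcases List.mem_flatMap.mp hm with ⟨u, hu, hc⟩
  rcases List.mem_append.mp hc with hc | hc
  · have := (h u hu).2 _ hc
    simp [PySem.Chars.isspace] at this
  · simp at hc

lemma join_nil' : PySem.Chars.join [' '] ([] : List (List Char)) = [] := by
  simp [PySem.Chars.join, List.intercalate]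

lemma join_single (w : List Char) : PySem.Chars.join [' '] [w] = w := by
  simp [PySem.Chars.join, List.intercalate]

lemma join_cons2 (w x : List Char) (xs : List (List Char)) :
    PySem.Chars.join [' '] (w :: x :: xs) = w ++ [' '] ++ PySem.Chars.join [' '] (x :: xs) := by
  simp [PySem.Chars.join, List.intercalate, List.intersperse]

lemma flat_eq_inter : ∀ {outs : List (List Char)}, outs ≠ [] →
    flatSp outs = PySem.Chars.join [' '] outs ++ [' ']
  | [], h => absurd rfl h
  | [w], _ => by simp [flatSp, join_single]
  | w :: x :: xs, _ => by
      rw [join_cons2]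
      have := flat_eq_inter (outs := x :: xs) (by simp)
      simp only [flatSp, List.flatMap_cons] at this ⊢
      rw [this]
      simp [List.append_assoc]

lemma inter_rev_head : ∀ {outs : List (List Char)}, outs ≠ [] →
    (∀ u ∈ outs, goodWord u) →
    ∃ c t, (PySem.Chars.join [' '] outs).reverse = c :: t ∧ PySem.Chars.isspace c = false
  | [], h, _ => absurd rfl h
  | [w], _, hg => by
      rcases (hg w (by simp)).1, (hg w (by simp)).2 with ⟨h1, h2⟩
      rcases List.eq_nil_or_concat w with rfl | ⟨t, c, rfl⟩
      · exact absurd rfl h1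
      · exact ⟨c, t.reverse, by simp [join_single], h2 c (by simp)⟩
  | w :: x :: xs, _, hg => by
      rcases inter_rev_head (outs := x :: xs) (by simp)
        (fun u hu => hg u (List.mem_cons_of_mem _ hu)) with ⟨c, t, hct, hc⟩
      refine ⟨c, t ++ [' '] ++ w.reverse, ?_, hc⟩
      rw [join_cons2]
      simp [hct]

lemma strip_flatSp {outs : List (List Char)} (h : ∀ u ∈ outs, goodWord u) :
    PySem.Chars.strip (flatSp outs) = PySem.Chars.join [' '] outs := by
  cases outs with
  | nil => simp [flatSp, join_nil', PySem.Chars.strip, PySem.Chars.lstrip, PySem.Chars.rstrip]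
  | cons w rest =>
      rw [flat_eq_inter (by simp)]
      rcases h w (by simp) with ⟨h1, h2⟩
      rcases (List.exists_cons_of_ne_nil h1) with ⟨a, as, rfl⟩
      unfold PySem.Chars.strip PySem.Chars.lstrip
      have hjoin : PySem.Chars.join [' '] ((a :: as) :: rest) = a :: as ++ PySem.Chars.join [' '] rest ∨
          PySem.Chars.join [' '] ((a :: as) :: rest) = a :: (as ++ [' '] ++ PySem.Chars.join [' '] rest) := by
        cases rest with
        | nil => left; simp [join_single]
        | cons x xs => right; rw [join_cons2]; simp
      have ha : PySem.Chars.isspace a = false := h2 a (by simp)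
      have hl : ∀ tail, List.dropWhile PySem.Chars.isspace (a :: tail) = a :: tail := by
        intro tail; rw [List.dropWhile_cons_of_neg (by simp [ha])]
      have hJa : ∃ tail, PySem.Chars.join [' '] ((a :: as) :: rest) = a :: tail := by
        rcases hjoin with hj | hj
        · exact ⟨as ++ PySem.Chars.join [' '] rest, by simpa using hj⟩
        · exact ⟨as ++ [' '] ++ PySem.Chars.join [' '] rest, by simpa using hj⟩
      rcases hJa with ⟨tail, hJ⟩
      rw [hJ]
      rw [show (a :: tail) ++ [' '] = a :: (tail ++ [' ']) by simp, hl (tail ++ [' '])]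
      unfold PySem.Chars.rstrip
      rw [show (a :: (tail ++ [' '])).reverse = ' ' :: (a :: tail).reverse by simp]
      rw [List.dropWhile_cons_of_pos (by simp [PySem.Chars.isspace])]
      rcases inter_rev_head (outs := (a :: as) :: rest) (by simp) h with ⟨c, t, hct, hc⟩
      rw [hJ] at hct
      rw [hct, List.dropWhile_cons_of_neg (by simp [hc])]
      rw [← hct]
      simp

-- ===== VERDICT (by name: the statement is the Claim_ definition above) =====
theorem fmt_desc_spec : Claim_equal_fmt_desc := by
  intro desc _
  unfold Spec_fmt_desc fmt_desc fmt_desc_alt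
  have hgood := split₀_good desc.toList
  set ws := PySem.Chars.split₀ desc.toList with hws
  have h1 : ((ws.foldl fmtStepA ([], true))).1 = flatSp (procW true ws) := by
    simpa using foldA ws [] true
  have h2 : ((groupSentences ws []).map fmtSentence).flatten = procW true ws := by
    simpa using group_scan ws []
  have hg : ∀ u ∈ procW true ws, goodWord u := procW_good hgood true
  simp only [h1, h2]
  rw [replace_noop (no_newline_flatSp hg), strip_flatSp hg]
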